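-- pv_equiv track=rewrite | github.com/Pchaewon/CodingTest-practice | 프로그래머스/lv0/120892. 암호 해독/암호 해독.py | solution
-- ===== SOURCE A (Python) =====
-- def solution(cipher, code):
--     answer = []
--     word_list = list(cipher)
--
--     index = code-1
--     while index<len(word_list):
--         answer.append(word_list[index])
--         index += code
--
--     return ''.join(answer)
-- ===== SOURCE B (Python) =====
-- def solution(cipher, code):
--     return ''.join(c for i, c in enumerate(cipher) if (i + 1) % code == 0)
-- ===== Notes on version B (the rewrite author's own statement) =====
-- stated objective: idiomatic
-- what changed: Replaces the explicit while-loop that steps an index forward by code with a single enumerate pass filtering characters whose 1-based position is a multiple of code, joined once.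
import Mathlib
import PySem

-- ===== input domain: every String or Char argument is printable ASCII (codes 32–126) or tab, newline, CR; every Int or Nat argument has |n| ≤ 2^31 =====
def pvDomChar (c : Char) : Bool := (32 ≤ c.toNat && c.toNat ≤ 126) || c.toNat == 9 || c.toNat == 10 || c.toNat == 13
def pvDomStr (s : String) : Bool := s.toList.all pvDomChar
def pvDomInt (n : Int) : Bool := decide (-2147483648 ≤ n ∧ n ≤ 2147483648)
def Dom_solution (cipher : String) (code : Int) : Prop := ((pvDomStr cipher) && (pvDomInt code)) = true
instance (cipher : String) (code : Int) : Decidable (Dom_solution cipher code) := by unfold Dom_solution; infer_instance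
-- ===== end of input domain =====

-- B replaces A's index-stepping while-loop with one enumerate pass filtering positions by a modulo test (idiomatic, same cost).


-- ===== PORT A =====
-- A's while loop; the '0 < code ∧ 0 ≤ index' parts of the guard are totality guards only
-- (under Pre_solution they always hold where the loop runs: index starts at code-1 ≥ 0 and grows).
def solLoopA (ws : List Char) (code : Int) (index : Int) (answer : List Char) : List Char :=
  if h : 0 < code ∧ 0 ≤ index ∧ index < (ws.length : Int) then
    match PySem.List.pyGet? ws index with
    | some c => solLoopA ws code (index + code) (answer ++ [c])
    | none => answer
  else answer
termination_by ((ws.length : Int) - index).toNat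
decreasing_by omega

def solution (cipher : String) (code : Int) : String :=
  let word_list := cipher.toList
  String.mk (solLoopA word_list code (code - 1) [])

-- ===== PORT B =====
def solution_alt (cipher : String) (code : Int) : String :=
  String.mk (((PySem.List.enumerate cipher.toList 0).filter
      (fun p => PySem.Int.mod (p.1 + 1) code == 0)).map (fun p => p.2))

-- ===== PRECONDITION & SPEC =====
-- For code ≤ 0 the Python A never returns (infinite loop, or IndexError through negative indices).
def Pre_solution (cipher : String) (code : Int) : Prop := 1 ≤ code
instance (cipher : String) (code : Int) : Decidable (Pre_solution cipher code) := by unfold Pre_solution; infer_instance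
def pvWitness_solution : String × Int := ("hello", 2)

def Spec_solution (cipher : String) (code : Int) (out : String) : Prop := out = solution_alt cipher code
instance (cipher : String) (code : Int) (out : String) : Decidable (Spec_solution cipher code out) := by unfold Spec_solution; infer_instance

-- ===== CLAIM (what is proved, stated in full; the proofs are below) =====
def Claim_equal_solution : Prop := ∀ (cipher : String) (code : Int), Dom_solution cipher code → Pre_solution cipher code → Spec_solution cipher code (solution cipher code)

-- ===== LEMMAS AND PROOFS =====

-- Common abstraction: pvG c k l drops k chars, takes one, then repeats with period c.
def pvG (c : Nat) : Nat → List Char → List Char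
  | _, [] => []
  | 0, x :: xs => x :: pvG c (c - 1) xs
  | k + 1, _ :: xs => pvG c k xs

theorem pvG_drop (c : Nat) : ∀ (m : Nat) (l : List Char), pvG c m l = pvG c 0 (l.drop m) := by
  intro m
  induction m with
  | zero => intro l; simp
  | succ m ih =>
    intro l
    cases l with
    | nil => simp [pvG]
    | cons x xs => simpa [pvG] using ih xs

theorem loopA_eq (ws : List Char) (code : Int) (hc : 1 ≤ code)
    (index : Int) (answer : List Char) (h : 0 ≤ index) :
    solLoopA ws code index answer = answer ++ pvG code.toNat 0 (ws.drop index.toNat) := by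
  rw [solLoopA]
  by_cases hlt : index < (ws.length : Int)
  · have hguard : 0 < code ∧ 0 ≤ index ∧ index < (ws.length : Int) := ⟨by omega, h, hlt⟩
    rw [dif_pos hguard]
    have hidx : index.toNat < ws.length := by omega
    rw [PySem.List.pyGet?_eq_some_getElem ws h hlt]
    show solLoopA ws code (index + code) (answer ++ [ws[index.toNat]]) =
      answer ++ pvG code.toNat 0 (ws.drop index.toNat)
    rw [loopA_eq ws code hc (index + code) (answer ++ [ws[index.toNat]]) (by omega)]
    have hdrop : ws.drop index.toNat = ws[index.toNat] :: ws.drop (index.toNat + 1) :=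
      List.drop_eq_getElem_cons hidx
    have h2 : (index + code).toNat = index.toNat + 1 + (code.toNat - 1) := by omega
    rw [hdrop, h2, ← List.drop_drop]
    simp [pvG, pvG_drop code.toNat (code.toNat - 1) (ws.drop (index.toNat + 1))]
  · rw [dif_neg (by omega)]
    have : ws.drop index.toNat = [] := List.drop_eq_nil_of_le (by omega)
    simp [this, pvG]
termination_by ((ws.length : Int) - index).toNat
decreasing_by omega

theorem filter_eq (code : Int) (hc : 1 ≤ code) :
    ∀ (l : List Char) (o k : Int), 0 ≤ k → k < code → PySem.Int.mod (o + k + 1) code = 0 →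
      ((PySem.List.enumerate l o).filter (fun p => PySem.Int.mod (p.1 + 1) code == 0)).map (fun p => p.2)
        = pvG code.toNat k.toNat l := by
  intro l
  induction l with
  | nil => intro o k _ _ _; simp [PySem.List.enumerate, pvG]
  | cons x xs ih =>
    intro o k hk0 hkc hmod
    rw [PySem.Int.mod_eq_emod_of_pos (by omega)] at hmod
    rw [PySem.List.enumerate_cons]
    by_cases hk : k = 0
    · subst hk
      have hhead : PySem.Int.mod (o + 1) code = 0 := by
        rw [PySem.Int.mod_eq_emod_of_pos (by omega)]
        simpa using hmod
      have hrec := ih (o + 1) (code - 1) (by omega) (by omega) (by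
        rw [PySem.Int.mod_eq_emod_of_pos (by omega)]
        have e : o + 1 + (code - 1) + 1 = (o + 1) + code * 1 := by ring
        rw [e, Int.add_mul_emod_self_left]
        simpa using hmod)
      have hknat : (0 : Int).toNat = 0 := rfl
      have hcnat : (code - 1).toNat = code.toNat - 1 := by omega
      have hG : pvG code.toNat 0 (x :: xs) = x :: pvG code.toNat (code.toNat - 1) xs := rfl
      simp only [List.filter_cons, hhead, hknat]
      rw [hG, ← hcnat, ← hrec]
      simp
    · have hkpos : 0 < k := by omega
      obtain ⟨t, ht⟩ := Int.dvd_of_emod_eq_zero hmod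
      have hhead : PySem.Int.mod (o + 1) code = code - k := by
        rw [PySem.Int.mod_eq_emod_of_pos (by omega)]
        have e : o + 1 = (code - k) + code * (t - 1) := by linear_combination ht
        rw [e, Int.add_mul_emod_self_left, Int.emod_eq_of_lt (by omega) (by omega)]
      have hrec := ih (o + 1) (k - 1) (by omega) (by omega) (by
        rw [PySem.Int.mod_eq_emod_of_pos (by omega)]
        have e : o + 1 + (k - 1) + 1 = o + k + 1 := by ring
        rw [e]; exact hmod)
      have hknat : k.toNat = (k - 1).toNat + 1 := by omega
      simp only [List.filter_cons]
      have hfalse : ((PySem.Int.mod (o + 1) code == 0) = false) := by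
        simp [hhead]; omega
      rw [hfalse]
      have : pvG code.toNat ((k - 1).toNat + 1) (x :: xs) = pvG code.toNat ((k - 1).toNat) xs := rfl
      rw [hknat, this, ← hrec]
      simp

-- ===== VERDICT (by name: the statement is the Claim_ definition above) =====
theorem solution_spec : Claim_equal_solution := by
  intro cipher code _ hpre
  have hc : 1 ≤ code := hpre
  unfold Spec_solution solution solution_alt
  dsimp only
  have hA := loopA_eq cipher.toList code hc (code - 1) [] (by omega)
  have hB := filter_eq code hc cipher.toList 0 (code - 1) (by omega) (by omega) (by
    rw [PySem.Int.mod_eq_emod_of_pos (by omega)]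
    have e : (0 : Int) + (code - 1) + 1 = code := by ring
    rw [e, Int.emod_self])
  rw [hA, hB, pvG_drop code.toNat (code - 1).toNat cipher.toList]
  simp
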